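-- pv_equiv track=rewrite | github.com/enier290188/hpc | service_django/application/src/application/hpc/linux.py | columns7
-- ===== SOURCE A (Python) =====
-- def columns7(line):
--     array = list()
--     space = False
--     counter = 0
--     string = ''
--     for index, char in enumerate(line.lstrip()):
--         if counter < 7:
--             if space:
--                 if char != " ":
--                     string += char
--                     space = False
--             else:
--                 if char != " ":
--                     string += char
--                 else:
--                     array.append(string)
--                     string = ''
--                     counter += 1
--                     space = True
--         else:
--             string += char
--     array.append(string)
--     return array
-- ===== SOURCE B (Python) =====
-- def columns7(line):
--     def go(s, k):
--         # split off the next token at the first space; k tokens still to split off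
--         head, sep, tail = s.partition(' ')
--         if not sep:
--             return [s]
--         if k == 1:
--             return [head, tail]
--         return [head] + go(tail.lstrip(' '), k - 1)
--     return go(line.lstrip(), 7)
-- ===== Notes on version B (the rewrite author's own statement) =====
-- stated objective: simpler
-- what changed: Replaces A's character-by-character space/counter state machine with a short recursion that splits off the head token with str.partition, strips the inter-token space run, and after the 7th token keeps the rest verbatim.
import Mathlib
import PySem

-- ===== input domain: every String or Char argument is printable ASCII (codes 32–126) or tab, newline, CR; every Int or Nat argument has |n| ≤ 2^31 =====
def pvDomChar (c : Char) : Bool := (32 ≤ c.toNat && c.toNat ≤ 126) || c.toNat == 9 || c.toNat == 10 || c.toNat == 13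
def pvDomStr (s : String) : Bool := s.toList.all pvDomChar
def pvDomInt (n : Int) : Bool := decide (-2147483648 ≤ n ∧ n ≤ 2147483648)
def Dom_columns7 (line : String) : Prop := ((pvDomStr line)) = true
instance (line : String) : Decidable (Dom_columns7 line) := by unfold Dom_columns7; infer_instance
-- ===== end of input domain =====

-- B replaces A's character-by-character space/counter state machine by a recursive
-- head-token split (str.partition) — a simpler decomposition, not claimed faster.

-- ===== PORT A =====
-- Python strings are modelled as List Char (PySem.Chars); tokens become String at the end.
-- A's loop body, one char at a time over state (array, space, counter, string).
def colsStep (st : List (List Char) × Bool × Nat × List Char) (c : Char) :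
    List (List Char) × Bool × Nat × List Char :=
  let (array, space, counter, string) := st
  if counter < 7 then
    if space then
      if c ≠ ' ' then (array, false, counter, string ++ [c]) else (array, space, counter, string)
    else
      if c ≠ ' ' then (array, space, counter, string ++ [c])
      else (array ++ [string], true, counter + 1, [])
  else (array, space, counter, string ++ [c])

def columns7 (line : String) : List String :=
  let st := (PySem.List.enumerate (PySem.Chars.lstrip line.toList) 0).foldl
      (fun st p => colsStep st p.2) ([], false, 0, [])
  (st.1 ++ [st.2.2.2]).map String.ofList

-- ===== PORT B =====
-- s.partition(' ') ported by hand (PySem has no partition): exact for the 1-char separator ' ';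
-- the middle component is `sep != ''`.
def partSpace : List Char → List Char × Bool × List Char
  | [] => ([], false, [])
  | c :: s =>
    if c = ' ' then ([], true, s)
    else
      let (h, f, t) := partSpace s
      (c :: h, f, t)

-- s.lstrip(' ') ported by hand (PySem.Chars.lstrip strips all whitespace, this one only ' '): exact.
def dropSpaces : List Char → List Char
  | [] => []
  | c :: s => if c = ' ' then dropSpaces s else c :: s

def colsGo (s : List Char) (k : Nat) : List (List Char) :=
  match partSpace s with
  | (_, false, _) => [s]
  | (head, _, tail) =>
    match k with
    | 0 | 1 => [head, tail]   -- Python's `k == 1` test; k starts at 7 and stops at 1, 0 is never reached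
    | k' + 2 => head :: colsGo (dropSpaces tail) (k' + 1)

def columns7_alt (line : String) : List String :=
  (colsGo (PySem.Chars.lstrip line.toList) 7).map String.ofList

-- ===== PRECONDITION & SPEC =====
def Spec_columns7 (line : String) (out : List String) : Prop := out = columns7_alt line
instance (line : String) (out : List String) : Decidable (Spec_columns7 line out) := by unfold Spec_columns7; infer_instance

-- ===== CLAIM (what is proved, stated in full; the proofs are below) =====
def Claim_equal_columns7 : Prop := ∀ (line : String), Dom_columns7 line → Spec_columns7 line (columns7 line)

-- ===== LEMMAS AND PROOFS =====

-- prepend p onto the first token of the list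
def consHead (p : List Char) : List (List Char) → List (List Char)
  | [] => [p]
  | t :: ts => (p ++ t) :: ts

def finishA (st : List (List Char) × Bool × Nat × List Char) : List (List Char) :=
  st.1 ++ [st.2.2.2]

theorem consHead_consHead (a b : List Char) (l : List (List Char)) :
    consHead a (consHead b l) = consHead (a ++ b) l := by
  cases l <;> simp [consHead]

theorem colsGo_cons_of_ne (c : Char) (hc : c ≠ ' ') (s : List Char) (k : Nat) :
    colsGo (c :: s) k = consHead [c] (colsGo s k) := by
  rw [colsGo, colsGo, partSpace]
  simp only [if_neg hc]
  rcases hps : partSpace s with ⟨h, f, t⟩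
  cases f
  · simp [consHead]
  · match k with
    | 0 => simp [consHead]
    | 1 => simp [consHead]
    | k' + 2 => simp [consHead]

theorem colsGo_space_one (s : List Char) : colsGo (' ' :: s) 1 = [[], s] := by
  rw [colsGo, partSpace]; simp

theorem colsGo_space (s : List Char) (k : Nat) (hk : 2 ≤ k) :
    colsGo (' ' :: s) k = [] :: colsGo (dropSpaces s) (k - 1) := by
  obtain ⟨k', rfl⟩ : ∃ k', k = k' + 2 := ⟨k - 2, by omega⟩
  rw [colsGo, partSpace]; simp

theorem foldl_step_c7 (s : List Char) (a : List (List Char)) (sp : Bool) (acc : List Char) :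
    finishA (List.foldl colsStep (a, sp, 7, acc) s) = a ++ [acc ++ s] := by
  induction s generalizing acc with
  | nil => simp [finishA]
  | cons c s ih =>
      simp only [List.foldl_cons, colsStep]
      norm_num
      rw [ih]
      simp

theorem foldl_step_main (s : List Char) :
    (∀ (a : List (List Char)) (c : Nat) (acc : List Char), c < 7 →
        finishA (List.foldl colsStep (a, false, c, acc) s) = a ++ consHead acc (colsGo s (7 - c)))
    ∧ (∀ (a : List (List Char)) (c : Nat), c < 7 →
        finishA (List.foldl colsStep (a, true, c, []) s) = a ++ colsGo (dropSpaces s) (7 - c)) := by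
  induction s with
  | nil =>
      constructor
      · intro a c acc hc
        rw [colsGo, partSpace]
        simp [finishA, consHead]
      · intro a c hc
        rw [dropSpaces, colsGo, partSpace]
        simp [finishA]
  | cons ch s ih =>
      constructor
      · intro a c acc hc
        by_cases hch : ch = ' '
        · subst hch
          simp only [List.foldl_cons, colsStep, if_pos hc]
          norm_num
          by_cases hc6 : c + 1 < 7
          · rw [ih.2 (a ++ [acc]) (c + 1) hc6,
              colsGo_space s (7 - c) (by omega)]
            have : 7 - (c + 1) = 7 - c - 1 := by omega
            rw [this]
            simp [consHead]
          · have hc' : c = 6 := by omega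
            subst hc'
            rw [foldl_step_c7]
            norm_num [colsGo_space_one, consHead]
        · simp only [List.foldl_cons, colsStep, if_pos hc, if_pos hch]
          norm_num [hch]
          rw [ih.1 a c (acc ++ [ch]) hc, colsGo_cons_of_ne ch hch, consHead_consHead]
      · intro a c hc
        by_cases hch : ch = ' '
        · subst hch
          simp only [List.foldl_cons, colsStep, if_pos hc]
          norm_num
          rw [ih.2 a c hc, dropSpaces]
          simp
        · simp only [List.foldl_cons, colsStep, if_pos hc]
          norm_num [hch]
          rw [ih.1 a c [ch] hc, dropSpaces]
          simp only [if_neg hch]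
          rw [← colsGo_cons_of_ne ch hch]

theorem foldl_enum (xs : List Char)
    (init : List (List Char) × Bool × Nat × List Char) :
    (PySem.List.enumerate xs 0).foldl (fun st p => colsStep st p.2) init
      = xs.foldl colsStep init := by
  conv_rhs => rw [← PySem.List.map_snd_enumerate xs 0]
  rw [List.foldl_map]

theorem colsGo_ne_nil (s : List Char) (k : Nat) : colsGo s k ≠ [] := by
  rw [colsGo]
  rcases partSpace s with ⟨h, f, t⟩
  cases f
  · simp
  · match k with
    | 0 => simp
    | 1 => simp
    | k' + 2 => simp

theorem consHead_nil (l : List (List Char)) (h : l ≠ []) : consHead [] l = l := by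
  cases l
  · exact absurd rfl h
  · simp [consHead]

-- ===== VERDICT (by name: the statement is the Claim_ definition above) =====
theorem columns7_spec : Claim_equal_columns7 := by
  intro line _
  show columns7 line = columns7_alt line
  simp only [columns7, columns7_alt, foldl_enum]
  have h := (foldl_step_main (PySem.Chars.lstrip line.toList)).1 [] 0 [] (by omega)
  unfold finishA at h
  norm_num at h
  rw [h, consHead_nil _ (colsGo_ne_nil _ _)]
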